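-- pv_equiv track=rewrite | github.com/pypi-data/pypi-mirror-56 | packages/fitmulticell/fitmulticell-0.0.3-py3-none-any.whl/fitmulticell/sumstat/hexagonal_cluster_sumstat.py | find_offset_int
-- ===== SOURCE A (Python) =====
-- def find_offset_int(edge: int, row: int) -> int:
--     """
--     Get the offset of the neighbor cells.
--
--     Parameters
--     ----------
--     edge: int
--         The edge size of the hexagonal grid.
--     row: int
--         The number of which we want to find its offset.
--
--     Returns
--     -------
--     offset: int
--         The offset of the specific row.
--     """
--     k = 0
--     counter_index = 0
--     offset = []
--     for i in range(0, edge * 2 - 2):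
--         if i < edge - 1:
--             k = edge + i
--             offset.append(k)
--         else:
--             offset.append(k - counter_index)
--             counter_index = counter_index + 1
--     return offset[row]
-- ===== SOURCE B (Python) =====
-- def find_offset_int(edge: int, row: int) -> int:
--     n = 2 * edge - 2
--     r = row + n if row < 0 else row
--     if not 0 <= r < n:
--         raise IndexError("list index out of range")
--     return edge + r if r < edge - 1 else 3 * edge - 3 - r
-- ===== Notes on version B (the rewrite author's own statement) =====
-- stated objective: faster
-- what changed: Replaced the O(edge) loop that builds the whole offset list and then indexes it by a closed-form O(1) formula (edge+r for the first half, 3*edge-3-r for the second, after normalising a negative index).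
import Mathlib
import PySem

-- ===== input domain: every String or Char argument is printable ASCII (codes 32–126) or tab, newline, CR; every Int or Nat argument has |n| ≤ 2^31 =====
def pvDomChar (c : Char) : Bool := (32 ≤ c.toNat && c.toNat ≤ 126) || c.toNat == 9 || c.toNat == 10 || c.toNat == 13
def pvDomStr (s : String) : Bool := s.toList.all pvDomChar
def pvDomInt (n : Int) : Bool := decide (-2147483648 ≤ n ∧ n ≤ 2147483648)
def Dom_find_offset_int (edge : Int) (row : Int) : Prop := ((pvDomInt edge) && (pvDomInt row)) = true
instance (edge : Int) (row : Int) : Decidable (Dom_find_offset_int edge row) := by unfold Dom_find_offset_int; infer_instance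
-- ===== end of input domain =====

-- B replaces A's O(edge) list-building loop by a closed-form O(1) formula; equivalence of the RETURN value is proved on Pre_ (the inputs where A's indexing does not raise).

-- ===== PORT A =====
-- state = (k, counter_index, offset)
-- the offset list is accumulated in reverse (cons = Python's O(1) append) and reversed once at the end
def pvStepA (edge : Int) (s : Int × Int × List Int) (i : Int) : Int × Int × List Int :=
  if i < edge - 1 then (edge + i, s.2.1, (edge + i) :: s.2.2)
  else (s.1, s.2.1 + 1, (s.1 - s.2.1) :: s.2.2)

def find_offset_int (edge : Int) (row : Int) : Int :=
  let st := (PySem.List.pyRange 0 (edge * 2 - 2) 1).foldl (pvStepA edge) (0, 0, [])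
  PySem.List.pyGetD st.2.2.reverse row 0   -- offset[row]; IndexError excluded by Pre_

-- ===== PORT B =====
def find_offset_int_alt (edge : Int) (row : Int) : Int :=
  let n := 2 * edge - 2
  let r := if row < 0 then row + n else row
  -- 0 ≤ r < n (else IndexError) is Pre_
  if r < edge - 1 then edge + r else 3 * edge - 3 - r

-- ===== PRECONDITION & SPEC =====
-- Pre_ excludes exactly the inputs where A's offset[row] raises IndexError: edge ≤ 1 (empty list) or row out of range.
def Pre_find_offset_int (edge : Int) (row : Int) : Prop :=
  2 ≤ edge ∧ -(2 * edge - 2) ≤ row ∧ row < 2 * edge - 2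
instance (edge : Int) (row : Int) : Decidable (Pre_find_offset_int edge row) := by unfold Pre_find_offset_int; infer_instance

def pvWitness_find_offset_int : Int × Int := (3, -2)

def Spec_find_offset_int (edge : Int) (row : Int) (out : Int) : Prop := out = find_offset_int_alt edge row
instance (edge : Int) (row : Int) (out : Int) : Decidable (Spec_find_offset_int edge row out) := by unfold Spec_find_offset_int; infer_instance

-- ===== CLAIM (what is proved, stated in full; the proofs are below) =====
def Claim_equal_find_offset_int : Prop := ∀ (edge : Int) (row : Int), Dom_find_offset_int edge row → Pre_find_offset_int edge row → Spec_find_offset_int edge row (find_offset_int edge row)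

-- ===== LEMMAS AND PROOFS =====

-- closed form of the list entry A's loop appends at position i
def pvEntry (e i : Int) : Int := if i < e - 1 then e + i else 3 * e - 3 - i

-- loop invariant for A's fold over range(0, m)
lemma pvLoopA (e : Int) (he : 2 ≤ e) (m : Nat) (hm : (m : Int) ≤ 2 * e - 2) :
    (PySem.List.pyRange 0 (m : Int) 1).foldl (pvStepA e) (0, 0, ([] : List Int)) =
      ((if m = 0 then 0 else e + min (m : Int) (e - 1) - 1),
       max 0 ((m : Int) - (e - 1)),
       ((PySem.List.pyRange 0 (m : Int) 1).map (pvEntry e)).reverse) := by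
  induction m with
  | zero =>
    simp only [Nat.cast_zero, PySem.List.pyRange_one_eq_nil le_rfl, List.foldl_nil,
      List.map_nil]
    refine Prod.ext rfl (Prod.ext ?_ rfl)
    simp only
    omega
  | succ m ih =>
    have hm' : (m : Int) ≤ 2 * e - 2 := by push_cast at hm ⊢; omega
    have hsucc : ((m + 1 : Nat) : Int) = (m : Int) + 1 := by push_cast; ring
    have h1 : m + 1 ≠ 0 := Nat.succ_ne_zero m
    rw [hsucc, PySem.List.pyRange_one_succ_right (a := 0) (b := (m : Int)) (by positivity),
        List.foldl_append, List.map_append, List.reverse_append, ih hm']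
    by_cases hlt : (m : Int) < e - 1
    · simp only [List.foldl_cons, List.foldl_nil, pvStepA, if_pos hlt]
      refine Prod.ext ?_ (Prod.ext ?_ ?_) <;> dsimp only
      · rw [if_neg h1]; omega
      · omega
      · simp only [List.map_cons, List.map_nil, List.reverse_cons, List.reverse_nil,
          List.nil_append, List.cons_append, pvEntry, if_pos hlt]
    · have hm0 : m ≠ 0 := by omega
      simp only [List.foldl_cons, List.foldl_nil, pvStepA, if_neg hlt]
      refine Prod.ext ?_ (Prod.ext ?_ ?_) <;> dsimp only
      · rw [if_neg hm0, if_neg h1]; omega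
      · omega
      · simp only [List.map_cons, List.map_nil, List.reverse_cons, List.reverse_nil,
          List.nil_append, List.cons_append, pvEntry, if_neg hlt, if_neg hm0]
        have hv : e + min (m : Int) (e - 1) - 1 - max 0 ((m : Int) - (e - 1)) = 3 * e - 3 - (m : Int) := by
          omega
        rw [hv]

lemma pvOffsetList (e : Int) (he : 2 ≤ e) :
    ((PySem.List.pyRange 0 (e * 2 - 2) 1).foldl (pvStepA e) (0, 0, ([] : List Int))).2.2.reverse =
      (PySem.List.pyRange 0 (e * 2 - 2) 1).map (pvEntry e) := by
  have hn : (((2 * e - 2).toNat : Int)) = e * 2 - 2 := by omega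
  rw [← hn, pvLoopA e he (2 * e - 2).toNat (by omega)]
  exact List.reverse_reverse _

-- ===== VERDICT (by name: the statement is the Claim_ definition above) =====
theorem find_offset_int_spec : Claim_equal_find_offset_int := by
  intro e row _ hpre
  obtain ⟨he, hlo, hhi⟩ := hpre
  unfold Spec_find_offset_int find_offset_int find_offset_int_alt
  simp only []
  rw [pvOffsetList e he]
  by_cases h0 : row < 0
  · -- negative index: row counts from the end
    set k : Nat := (-row).toNat with hk
    have hrow : row = -(k : Int) := by omega
    have hlen : ((PySem.List.pyRange 0 (e * 2 - 2) 1).map (pvEntry e)).length = (2 * e - 2).toNat := by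
      rw [List.length_map, PySem.List.length_pyRange_one]; congr 1; omega
    have hkpos : 0 < k := by omega
    have hkle : k ≤ ((PySem.List.pyRange 0 (e * 2 - 2) 1).map (pvEntry e)).length := by
      rw [hlen]; omega
    rw [hrow, PySem.List.pyGetD_neg_natCast _ k 0 hkpos hkle]
    have hj : ((PySem.List.pyRange 0 (e * 2 - 2) 1).map (pvEntry e)).length - k < (e * 2 - 2 - 0).toNat := by
      rw [hlen]; omega
    rw [List.getElem_map, PySem.List.getElem_pyRange_one (k := ((PySem.List.pyRange 0 (e * 2 - 2) 1).map (pvEntry e)).length - k) (h := by rw [PySem.List.length_pyRange_one]; exact hj)]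
    have hcast : (0 : Int) + ((((PySem.List.pyRange 0 (e * 2 - 2) 1).map (pvEntry e)).length - k : Nat) : Int) = row + (2 * e - 2) := by
      rw [hlen]; omega
    rw [hcast]
    simp only [pvEntry]
    split_ifs <;> omega
  · -- nonnegative index
    rw [PySem.List.pyGetD_map_pyRange_of_nonneg (pvEntry e) (e * 2 - 2) row 0 (by omega) (by omega)]
    simp only [pvEntry]
    split_ifs <;> omega
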